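-- pv_equiv track=rewrite | github.com/tgg12321/BushidoBladeDecompile | tools/psyq_stdlib_scan.py | looks_like_memset
-- ===== SOURCE A (Python) =====
-- def looks_like_memset(insns) -> bool:
--     if not 4 <= len(insns) <= 18:
--         return False
--     mnems = [m for m, _ in insns]
--     has_store = any(m in ("sb", "sw", "sh") for m in mnems)
--     has_loop = any(m in ("bne", "bnez", "bgtz") for m in mnems)
--     has_no_load = not any(m in ("lw", "lh", "lhu", "lb", "lbu") for m in mnems)
--     return has_store and has_loop and has_no_load
-- ===== SOURCE B (Python) =====
-- _CLASS = {
--     "sb": 1, "sw": 1, "sh": 1,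
--     "bne": 2, "bnez": 2, "bgtz": 2,
--     "lw": 4, "lh": 4, "lhu": 4, "lb": 4, "lbu": 4,
-- }
--
-- def looks_like_memset(insns) -> bool:
--     if not 4 <= len(insns) <= 18:
--         return False
--     mask = 0
--     for m, _ in insns:
--         mask |= _CLASS.get(m, 0)
--     return mask == 3
-- ===== Notes on version B (the rewrite author's own statement) =====
-- stated objective: alternative
-- what changed: Replaced the three tuple-membership any() scans with a precomputed dict classifying each mnemonic into a bit (store=1, loop=2, load=4), a single OR-fold of those bits into one integer mask, and the final test mask == 3.
import Mathlib
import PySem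

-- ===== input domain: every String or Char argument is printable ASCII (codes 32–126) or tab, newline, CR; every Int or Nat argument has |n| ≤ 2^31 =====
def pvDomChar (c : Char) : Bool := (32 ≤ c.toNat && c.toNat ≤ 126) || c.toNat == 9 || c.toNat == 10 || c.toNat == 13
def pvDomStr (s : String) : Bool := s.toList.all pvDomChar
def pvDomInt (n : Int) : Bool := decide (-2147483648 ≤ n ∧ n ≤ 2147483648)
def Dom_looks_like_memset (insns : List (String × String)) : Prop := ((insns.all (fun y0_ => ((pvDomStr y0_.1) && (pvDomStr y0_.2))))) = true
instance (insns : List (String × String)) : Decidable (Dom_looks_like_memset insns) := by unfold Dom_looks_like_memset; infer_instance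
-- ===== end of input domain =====

-- B classifies each mnemonic via a precomputed dict into a bit (store=1, loop=2, load=4), ORs the bits into one mask and tests mask == 3 (objective: alternative).

-- ===== PORT A =====
def pvIsStore (m : String) : Bool := m == "sb" || m == "sw" || m == "sh"
def pvIsLoop (m : String) : Bool := m == "bne" || m == "bnez" || m == "bgtz"
def pvIsLoad (m : String) : Bool := m == "lw" || m == "lh" || m == "lhu" || m == "lb" || m == "lbu"

def looks_like_memset (insns : List (String × String)) : Bool :=
  if !(4 ≤ insns.length && insns.length ≤ 18) then false
  else
    let mnems := insns.map (fun p => p.1)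
    let has_store := mnems.any pvIsStore
    let has_loop := mnems.any pvIsLoop
    let has_no_load := !(mnems.any pvIsLoad)
    has_store && has_loop && has_no_load

-- ===== PORT B =====
def pvClassDict : PySem.Dict String Int :=
  PySem.Dict.ofList [("sb", 1), ("sw", 1), ("sh", 1),
                     ("bne", 2), ("bnez", 2), ("bgtz", 2),
                     ("lw", 4), ("lh", 4), ("lhu", 4), ("lb", 4), ("lbu", 4)]

def looks_like_memset_alt (insns : List (String × String)) : Bool :=
  if !(4 ≤ insns.length && insns.length ≤ 18) then false
  else
    let mask := insns.foldl (fun (mask : Int) p => Int.lor mask (pvClassDict.getD p.1 0)) 0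
    mask == 3

-- ===== PRECONDITION & SPEC =====
def Spec_looks_like_memset (insns : List (String × String)) (out : Bool) : Prop := out = looks_like_memset_alt insns
instance (insns : List (String × String)) (out : Bool) : Decidable (Spec_looks_like_memset insns out) := by unfold Spec_looks_like_memset; infer_instance

-- ===== CLAIM (what is proved, stated in full; the proofs are below) =====
def Claim_equal_looks_like_memset : Prop := ∀ (insns : List (String × String)), Dom_looks_like_memset insns → Spec_looks_like_memset insns (looks_like_memset insns)

-- ===== LEMMAS AND PROOFS =====

theorem pvClassDict_mk : pvClassDict = PySem.Dict.mk
    [("sb", 1), ("sw", 1), ("sh", 1), ("bne", 2), ("bnez", 2), ("bgtz", 2),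
     ("lw", 4), ("lh", 4), ("lhu", 4), ("lb", 4), ("lbu", 4)] := by decide

-- the dict classifies exactly by the three membership predicates
theorem pvClass_eq (m : String) :
    pvClassDict.getD m 0 =
      if pvIsStore m then 1 else if pvIsLoop m then 2 else if pvIsLoad m then 4 else 0 := by
  by_cases h1 : pvIsStore m
  · simp only [pvIsStore, Bool.or_eq_true, beq_iff_eq] at h1
    rcases h1 with (h | h) | h <;> subst h <;> decide
  · by_cases h2 : pvIsLoop m
    · simp only [h1, h2, if_true, if_false]
      simp only [pvIsLoop, Bool.or_eq_true, beq_iff_eq] at h2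
      rcases h2 with (h | h) | h <;> subst h <;> decide
    · by_cases h3 : pvIsLoad m
      · simp only [h1, h2, h3, if_true, if_false]
        simp only [pvIsLoad, Bool.or_eq_true, beq_iff_eq] at h3
        rcases h3 with (((h | h) | h) | h) | h <;> subst h <;> decide
      · simp only [h1, h2, h3, if_false]
        simp only [pvIsStore, Bool.or_eq_true, beq_iff_eq, not_or] at h1
        simp only [pvIsLoop, Bool.or_eq_true, beq_iff_eq, not_or] at h2
        simp only [pvIsLoad, Bool.or_eq_true, beq_iff_eq, not_or] at h3
        obtain ⟨⟨a1, a2⟩, a3⟩ := h1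
        obtain ⟨⟨b1, b2⟩, b3⟩ := h2
        obtain ⟨⟨⟨⟨c1, c2⟩, c3⟩, c4⟩, c5⟩ := h3
        rw [pvClassDict_mk, PySem.Dict.getD_eq_get?_getD]
        simp [PySem.Dict.get?_mk_cons, beq_iff_eq, PySem.Dict.get?,
              Ne.symm a1, Ne.symm a2, Ne.symm a3, Ne.symm b1, Ne.symm b2, Ne.symm b3,
              Ne.symm c1, Ne.symm c2, Ne.symm c3, Ne.symm c4, Ne.symm c5]

-- bitmask encoding of the three flags
def pvEnc (s l d : Bool) : Int :=
  Int.lor (Int.lor (if s then 1 else 0) (if l then 2 else 0)) (if d then 4 else 0)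

theorem pv_disj_store (m : String) (h : pvIsStore m = true) :
    pvIsLoop m = false ∧ pvIsLoad m = false := by
  simp only [pvIsStore, Bool.or_eq_true, beq_iff_eq] at h
  rcases h with (h | h) | h <;> subst h <;> decide

theorem pv_disj_loop (m : String) (h : pvIsLoop m = true) : pvIsLoad m = false := by
  simp only [pvIsLoop, Bool.or_eq_true, beq_iff_eq] at h
  rcases h with (h | h) | h <;> subst h <;> decide

theorem pv_step (m : String) (s l d : Bool) :
    Int.lor (pvEnc s l d) (pvClassDict.getD m 0)
      = pvEnc (s || pvIsStore m) (l || pvIsLoop m) (d || pvIsLoad m) := by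
  rw [pvClass_eq]
  by_cases h1 : pvIsStore m
  · obtain ⟨h2, h3⟩ := pv_disj_store m h1
    simp only [h1, h2, h3, if_true]
    cases s <;> cases l <;> cases d <;> decide
  · by_cases h2 : pvIsLoop m
    · have h3 := pv_disj_loop m h2
      simp only [h1, h2, h3, if_true, if_false]
      cases s <;> cases l <;> cases d <;> decide
    · by_cases h3 : pvIsLoad m <;> simp only [h1, h2, h3, if_true, if_false] <;>
        cases s <;> cases l <;> cases d <;> decide

theorem pv_fold_mask (xs : List (String × String)) (s l d : Bool) :
    xs.foldl (fun (mask : Int) p => Int.lor mask (pvClassDict.getD p.1 0)) (pvEnc s l d)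
      = pvEnc (s || (xs.map (fun p => p.1)).any pvIsStore)
              (l || (xs.map (fun p => p.1)).any pvIsLoop)
              (d || (xs.map (fun p => p.1)).any pvIsLoad) := by
  induction xs generalizing s l d with
  | nil => simp
  | cons h t ih =>
    simp only [List.foldl_cons, List.map_cons, List.any_cons, pv_step, ih, Bool.or_assoc]

theorem pv_fold_mask0 (xs : List (String × String)) :
    xs.foldl (fun (mask : Int) p => Int.lor mask (pvClassDict.getD p.1 0)) 0
      = pvEnc ((xs.map (fun p => p.1)).any pvIsStore)
              ((xs.map (fun p => p.1)).any pvIsLoop)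
              ((xs.map (fun p => p.1)).any pvIsLoad) := by
  have h := pv_fold_mask xs false false false
  have h0 : pvEnc false false false = 0 := by decide
  rw [h0] at h
  simpa using h

theorem pvEnc_eq_three (s l d : Bool) : ((pvEnc s l d : Int) == 3) = (s && l && !d) := by
  cases s <;> cases l <;> cases d <;> decide

-- ===== VERDICT (by name: the statement is the Claim_ definition above) =====
theorem looks_like_memset_spec : Claim_equal_looks_like_memset := by
  intro insns _
  unfold Spec_looks_like_memset looks_like_memset looks_like_memset_alt
  split
  · rfl
  · simp only [pv_fold_mask0, pvEnc_eq_three]
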